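-- pv_equiv track=rewrite | github.com/manoelf/atal | lista01/torneio_em_sequencia.py | combina
-- ===== SOURCE A (Python) =====
-- def combina(tor, al, pesos, conj):
--     cal = 0
--     if (tor == 3):
--         for i in range(1, al + 1):
--             for j in range(1, al + 1):
--                 for k in range(1, al + 1):
--                     cal = (i * pesos[0]) + (j * pesos[1]) + (k * pesos[2])
--                     if (cal in conj):
--                         return False
--                     else:
--                         conj[cal] = True
--         return True
--     elif (tor == 2):
--         for i in range(1, al + 1):
--             for j in range(1, al + 1):
--                 cal = (i * pesos[0]) + (j * pesos[1])
--                 if (cal in conj):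
--                     return False
--                 else:
--                     conj[cal] = True
--         return True
--     else:
--         for i in range(1, al + 1):
--             cal = i * pesos[0]
--             if (cal in conj):
--                 return False
--             else:
--                 conj[cal] = True
--         return True
-- ===== SOURCE B (Python) =====
-- def _extend(sums, al, pesos, d):
--     for s in sums:
--         for i in range(1, al + 1):
--             yield s + i * pesos[d]
--
-- def combina(tor, al, pesos, conj):
--     n = 3 if tor == 3 else 2 if tor == 2 else 1
--     sums = iter([0])
--     for d in range(n):
--         sums = _extend(sums, al, pesos, d)
--     for cal in sums:
--         if cal in conj:
--             return False
--         conj[cal] = True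
--     return True
-- ===== Notes on version B (the rewrite author's own statement) =====
-- stated objective: alternative
-- what changed: Replaces A's three hand-written nested-loop branches by one generic pass: pick the dimension n from tor, build the stream of weighted sums dimension-by-dimension with a lazy generator pipeline, then a single flat scan checks membership and inserts into conj.
import Mathlib
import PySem

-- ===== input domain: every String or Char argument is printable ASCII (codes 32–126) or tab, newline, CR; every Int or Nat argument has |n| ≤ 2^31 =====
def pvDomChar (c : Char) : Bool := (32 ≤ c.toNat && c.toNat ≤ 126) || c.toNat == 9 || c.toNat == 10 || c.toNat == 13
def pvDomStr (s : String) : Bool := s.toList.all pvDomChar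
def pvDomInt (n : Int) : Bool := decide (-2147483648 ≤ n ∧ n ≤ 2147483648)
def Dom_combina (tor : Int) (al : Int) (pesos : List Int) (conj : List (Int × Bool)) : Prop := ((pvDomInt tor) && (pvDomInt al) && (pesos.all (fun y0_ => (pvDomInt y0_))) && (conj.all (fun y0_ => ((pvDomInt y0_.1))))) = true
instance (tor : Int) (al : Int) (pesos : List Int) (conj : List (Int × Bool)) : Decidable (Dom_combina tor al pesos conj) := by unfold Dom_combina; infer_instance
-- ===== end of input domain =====

-- B replaces A's three hand-written nested-loop branches by one generic pass: the weighted
-- sums are built dimension-by-dimension (a lazy generator pipeline in Source B; the same list here), then one scan checks/inserts into conj.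
-- (objective: alternative; A mutates conj in place and B performs the identical mutation;
-- the equivalence proved here is about the return value only.)

-- ===== PORT A =====
-- innermost loop over k: check cal, insert; none = "return False"
def aLoopK (p0 p1 p2 i j : Int) (conj : PySem.Dict Int Bool) : List Int → Option (PySem.Dict Int Bool)
  | [] => some conj
  | k :: ks =>
    let cal := (i * p0) + (j * p1) + (k * p2)
    if conj.contains cal then none else aLoopK p0 p1 p2 i j (conj.insert cal true) ks

def aLoopJ3 (p0 p1 p2 i al : Int) (conj : PySem.Dict Int Bool) : List Int → Option (PySem.Dict Int Bool)
  | [] => some conj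
  | j :: js =>
    match aLoopK p0 p1 p2 i j conj (PySem.List.pyRange 1 (al + 1) 1) with
    | none => none
    | some c => aLoopJ3 p0 p1 p2 i al c js

def aLoopI3 (p0 p1 p2 al : Int) (conj : PySem.Dict Int Bool) : List Int → Option (PySem.Dict Int Bool)
  | [] => some conj
  | i :: is =>
    match aLoopJ3 p0 p1 p2 i al conj (PySem.List.pyRange 1 (al + 1) 1) with
    | none => none
    | some c => aLoopI3 p0 p1 p2 al c is

def aLoopJ2 (p0 p1 i : Int) (conj : PySem.Dict Int Bool) : List Int → Option (PySem.Dict Int Bool)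
  | [] => some conj
  | j :: js =>
    let cal := (i * p0) + (j * p1)
    if conj.contains cal then none else aLoopJ2 p0 p1 i (conj.insert cal true) js

def aLoopI2 (p0 p1 al : Int) (conj : PySem.Dict Int Bool) : List Int → Option (PySem.Dict Int Bool)
  | [] => some conj
  | i :: is =>
    match aLoopJ2 p0 p1 i conj (PySem.List.pyRange 1 (al + 1) 1) with
    | none => none
    | some c => aLoopI2 p0 p1 al c is

def aLoopI1 (p0 : Int) (conj : PySem.Dict Int Bool) : List Int → Option (PySem.Dict Int Bool)
  | [] => some conj
  | i :: is =>
    let cal := i * p0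
    if conj.contains cal then none else aLoopI1 p0 (conj.insert cal true) is

-- pesos[d] is exact inside Pre_ (index in range); outside Pre_ Python raises IndexError
def combina (tor : Int) (al : Int) (pesos : List Int) (conj : List (Int × Bool)) : Bool :=
  let d := PySem.Dict.mk conj
  if tor == 3 then
    match aLoopI3 (PySem.List.pyGetD pesos 0 0) (PySem.List.pyGetD pesos 1 0)
        (PySem.List.pyGetD pesos 2 0) al d (PySem.List.pyRange 1 (al + 1) 1) with
    | none => false
    | some _ => true
  else if tor == 2 then
    match aLoopI2 (PySem.List.pyGetD pesos 0 0) (PySem.List.pyGetD pesos 1 0) al d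
        (PySem.List.pyRange 1 (al + 1) 1) with
    | none => false
    | some _ => true
  else
    match aLoopI1 (PySem.List.pyGetD pesos 0 0) d (PySem.List.pyRange 1 (al + 1) 1) with
    | none => false
    | some _ => true

-- ===== PORT B =====
-- the final scan: first value already present in conj → False, else insert and continue
def altScan (conj : PySem.Dict Int Bool) : List Int → Bool
  | [] => true
  | cal :: rest => if conj.contains cal then false else altScan (conj.insert cal true) rest

def combina_alt (tor : Int) (al : Int) (pesos : List Int) (conj : List (Int × Bool)) : Bool :=
  let n : Nat := if tor == 3 then 3 else if tor == 2 then 2 else 1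
  let sums := (List.range n).foldl
    (fun acc d => acc.flatMap
      (fun s => (PySem.List.pyRange 1 (al + 1) 1).map
        (fun i => s + i * PySem.List.pyGetD pesos (d : Int) 0))) [0]
  altScan (PySem.Dict.mk conj) sums

-- ===== PRECONDITION & SPEC =====
-- Pre_ excludes exactly the inputs where Python A raises IndexError: pesos shorter than the
-- number of weights the chosen branch reads (read only when the loops run at all, i.e. al ≥ 1).
def Pre_combina (tor : Int) (al : Int) (pesos : List Int) (conj : List (Int × Bool)) : Prop :=
  1 ≤ al → (pesos.length : Int) ≥ (if tor = 3 then 3 else if tor = 2 then 2 else 1)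
instance (tor : Int) (al : Int) (pesos : List Int) (conj : List (Int × Bool)) : Decidable (Pre_combina tor al pesos conj) := by unfold Pre_combina; infer_instance
def pvWitness_combina : Int × Int × List Int × (List (Int × Bool)) := (3, 2, [1, 2, 4], [])

def Spec_combina (tor : Int) (al : Int) (pesos : List Int) (conj : List (Int × Bool)) (out : Bool) : Prop := out = combina_alt tor al pesos conj
instance (tor : Int) (al : Int) (pesos : List Int) (conj : List (Int × Bool)) (out : Bool) : Decidable (Spec_combina tor al pesos conj out) := by unfold Spec_combina; infer_instance

-- ===== CLAIM (what is proved, stated in full; the proofs are below) =====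
def Claim_equal_combina : Prop := ∀ (tor : Int) (al : Int) (pesos : List Int) (conj : List (Int × Bool)), Dom_combina tor al pesos conj → Pre_combina tor al pesos conj → Spec_combina tor al pesos conj (combina tor al pesos conj)

-- ===== LEMMAS AND PROOFS =====

-- optScan mirrors altScan but returns the resulting dict (none = duplicate found)
def optScan (conj : PySem.Dict Int Bool) : List Int → Option (PySem.Dict Int Bool)
  | [] => some conj
  | cal :: rest => if conj.contains cal then none else optScan (conj.insert cal true) rest

theorem altScan_eq_optScan (conj : PySem.Dict Int Bool) (l : List Int) :
    altScan conj l = (optScan conj l).isSome := by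
  induction l generalizing conj with
  | nil => rfl
  | cons x xs ih => simp only [altScan, optScan]; split <;> simp [ih]

theorem optScan_append (conj : PySem.Dict Int Bool) (l1 l2 : List Int) :
    optScan conj (l1 ++ l2) = (optScan conj l1).bind (fun c => optScan c l2) := by
  induction l1 generalizing conj with
  | nil => rfl
  | cons x xs ih => simp only [List.cons_append, optScan]; split <;> simp [ih]

theorem aLoopK_eq (p0 p1 p2 i j : Int) (conj : PySem.Dict Int Bool) (ks : List Int) :
    aLoopK p0 p1 p2 i j conj ks = optScan conj (ks.map (fun k => (i * p0) + (j * p1) + (k * p2))) := by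
  induction ks generalizing conj with
  | nil => rfl
  | cons k ks ih => simp only [aLoopK, List.map_cons, optScan]; split <;> simp [ih]

theorem aLoopJ3_eq (p0 p1 p2 i al : Int) (conj : PySem.Dict Int Bool) (js : List Int) :
    aLoopJ3 p0 p1 p2 i al conj js = optScan conj (js.flatMap (fun j =>
      (PySem.List.pyRange 1 (al + 1) 1).map (fun k => (i * p0) + (j * p1) + (k * p2)))) := by
  induction js generalizing conj with
  | nil => rfl
  | cons j js ih =>
    simp only [aLoopJ3, List.flatMap_cons, optScan_append, aLoopK_eq]
    cases optScan conj ((PySem.List.pyRange 1 (al + 1) 1).map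
        (fun k => (i * p0) + (j * p1) + (k * p2))) <;> simp [ih]

theorem aLoopI3_eq (p0 p1 p2 al : Int) (conj : PySem.Dict Int Bool) (is : List Int) :
    aLoopI3 p0 p1 p2 al conj is = optScan conj (is.flatMap (fun i =>
      (PySem.List.pyRange 1 (al + 1) 1).flatMap (fun j =>
        (PySem.List.pyRange 1 (al + 1) 1).map (fun k => (i * p0) + (j * p1) + (k * p2))))) := by
  induction is generalizing conj with
  | nil => rfl
  | cons i is ih =>
    simp only [aLoopI3, List.flatMap_cons, optScan_append, aLoopJ3_eq]
    cases optScan conj ((PySem.List.pyRange 1 (al + 1) 1).flatMap (fun j =>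
        (PySem.List.pyRange 1 (al + 1) 1).map (fun k => (i * p0) + (j * p1) + (k * p2)))) <;> simp [ih]

theorem aLoopJ2_eq (p0 p1 i : Int) (conj : PySem.Dict Int Bool) (js : List Int) :
    aLoopJ2 p0 p1 i conj js = optScan conj (js.map (fun j => (i * p0) + (j * p1))) := by
  induction js generalizing conj with
  | nil => rfl
  | cons j js ih => simp only [aLoopJ2, List.map_cons, optScan]; split <;> simp [ih]

theorem aLoopI2_eq (p0 p1 al : Int) (conj : PySem.Dict Int Bool) (is : List Int) :
    aLoopI2 p0 p1 al conj is = optScan conj (is.flatMap (fun i =>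
      (PySem.List.pyRange 1 (al + 1) 1).map (fun j => (i * p0) + (j * p1)))) := by
  induction is generalizing conj with
  | nil => rfl
  | cons i is ih =>
    simp only [aLoopI2, List.flatMap_cons, optScan_append, aLoopJ2_eq]
    cases optScan conj ((PySem.List.pyRange 1 (al + 1) 1).map
        (fun j => (i * p0) + (j * p1))) <;> simp [ih]

theorem aLoopI1_eq (p0 : Int) (conj : PySem.Dict Int Bool) (is : List Int) :
    aLoopI1 p0 conj is = optScan conj (is.map (fun i => i * p0)) := by
  induction is generalizing conj with
  | nil => rfl
  | cons i is ih => simp only [aLoopI1, List.map_cons, optScan]; split <;> simp [ih]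

-- ===== VERDICT (by name: the statement is the Claim_ definition above) =====
theorem combina_spec : Claim_equal_combina := by
  intro tor al pesos conj _ _
  have mIs : ∀ (o : Option (PySem.Dict Int Bool)),
      (match o with | none => false | some _ => true) = o.isSome := fun o => by cases o <;> rfl
  unfold Spec_combina combina combina_alt
  by_cases h3 : tor = 3
  · simp only [h3, beq_self_eq_true, if_true, aLoopI3_eq, mIs, altScan_eq_optScan]
    simp [List.range_succ, List.flatMap_map, List.flatMap_assoc, PySem.List.pyGetD_ofNat']
  · by_cases h2 : tor = 2
    · simp only [h2, show ((2 : Int) == 3) = false by decide, beq_self_eq_true, if_true,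
        Bool.false_eq_true, if_false, aLoopI2_eq, mIs, altScan_eq_optScan]
      simp [List.range_succ, List.flatMap_map, PySem.List.pyGetD_ofNat']
    · have e3 : (tor == 3) = false := by simp [h3]
      have e2 : (tor == 2) = false := by simp [h2]
      simp only [e3, e2, Bool.false_eq_true, if_false, aLoopI1_eq, mIs, altScan_eq_optScan]
      simp [List.range_succ, PySem.List.pyGetD_ofNat']
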